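-- pv_equiv track=rewrite | github.com/Burbon13/Advent-of-Code-2023 | day-11-galaxies.py | empty_rows_and_cols
-- ===== SOURCE A (Python) =====
-- def empty_rows_and_cols(the_map):
--     empty_rows = []
--     for i, row in enumerate(the_map):
--         if set(row) == {'.'}:
--             empty_rows.append(i)
--     empty_cols = []
--     for j in range(len(the_map[0])):
--         if set([the_map[i][j] for i in range(len(the_map))]) == {'.'}:
--             empty_cols.append(j)
--     return empty_rows, empty_cols
-- ===== SOURCE B (Python) =====
-- def empty_rows_and_cols(the_map):
--     width = len(the_map[0])
--     empty_rows = []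
--     nonempty_cols = set()
--     for i, row in enumerate(the_map):
--         if row and all(c == '.' for c in row):
--             empty_rows.append(i)
--         for j in range(width):
--             if row[j] != '.':
--                 nonempty_cols.add(j)
--     empty_cols = [j for j in range(width) if j not in nonempty_cols]
--     return empty_rows, empty_cols
-- ===== Notes on version B (the rewrite author's own statement) =====
-- stated objective: faster
-- what changed: Single pass over the rows builds empty_rows and a set of non-empty column indices at once, then empty_cols is read off by filtering range(width); this removes A's per-column re-scan of the whole map and A's construction of a fresh Python set per row and per column.
import Mathlib
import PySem

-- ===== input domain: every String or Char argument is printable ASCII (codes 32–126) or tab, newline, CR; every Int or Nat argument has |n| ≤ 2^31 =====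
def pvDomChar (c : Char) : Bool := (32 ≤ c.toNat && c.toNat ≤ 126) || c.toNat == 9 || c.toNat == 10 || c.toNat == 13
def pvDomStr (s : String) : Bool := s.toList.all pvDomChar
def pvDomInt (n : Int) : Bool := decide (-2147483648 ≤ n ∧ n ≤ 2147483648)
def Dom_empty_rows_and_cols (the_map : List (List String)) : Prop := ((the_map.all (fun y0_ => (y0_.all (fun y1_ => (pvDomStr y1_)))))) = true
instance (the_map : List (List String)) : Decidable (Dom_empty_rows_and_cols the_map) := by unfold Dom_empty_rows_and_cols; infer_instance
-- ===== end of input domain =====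

-- B makes one pass over the rows, collecting empty rows and a set of non-empty column
-- indices, then filters range(width) — an alternative to A's per-column re-scan.


-- ===== PORT A =====
def empty_rows_and_cols (the_map : List (List String)) : List Int × List Int :=
  -- empty_rows: for i, row in enumerate(the_map): if set(row) == {'.'}: append i
  let empty_rows : List Int :=
    (PySem.List.enumerate the_map).foldl
      (fun acc p => if PySem.Set.equal (PySem.Set.ofList p.2) (PySem.Set.ofList ["."]) then acc ++ [p.1] else acc) []
  -- empty_cols: for j in range(len(the_map[0])): if set([the_map[i][j] for i in range(len(the_map))]) == {'.'}: append j
  -- the_map[0] / the_map[i][j] ported via pyGetD; Pre_ excludes the inputs where Python raises IndexError here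
  let empty_cols : List Int :=
    (PySem.List.pyRange 0 ((PySem.List.pyGetD the_map 0 []).length : Int) 1).foldl
      (fun acc j =>
        if PySem.Set.equal
            (PySem.Set.ofList ((PySem.List.pyRange 0 (the_map.length : Int) 1).map
              (fun i => PySem.List.pyGetD (PySem.List.pyGetD the_map i []) j "")))
            (PySem.Set.ofList ["."])
        then acc ++ [j] else acc) []
  (empty_rows, empty_cols)

-- ===== PORT B =====
def empty_rows_and_cols_alt (the_map : List (List String)) : List Int × List Int :=
  let width : Int := ((PySem.List.pyGetD the_map 0 []).length : Int)
  -- one pass: accumulate (empty_rows, nonempty_cols); row[j] ported via pyGetD (Pre_ excludes IndexError inputs)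
  let st :=
    (PySem.List.enumerate the_map).foldl
      (fun (st : List Int × PySem.Set Int) p =>
        let rows := if p.2 ≠ [] ∧ p.2.all (· == ".") then st.1 ++ [p.1] else st.1
        let ne := (PySem.List.pyRange 0 width 1).foldl
          (fun s j => if PySem.List.pyGetD p.2 j "" ≠ "." then PySem.Set.add s j else s) st.2
        (rows, ne))
      ([], PySem.Set.empty)
  (st.1, (PySem.List.pyRange 0 width 1).filter (fun j => !(PySem.Set.contains st.2 j)))

-- ===== PRECONDITION & SPEC =====
-- Pre_ excludes exactly the inputs where Python A raises IndexError: the empty map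
-- (the_map[0]) and ragged maps with a row shorter than row 0 (the_map[i][j]).
def Pre_empty_rows_and_cols (the_map : List (List String)) : Prop :=
  the_map ≠ [] ∧ ∀ row ∈ the_map, (the_map.headD []).length ≤ row.length
instance (the_map : List (List String)) : Decidable (Pre_empty_rows_and_cols the_map) := by
  unfold Pre_empty_rows_and_cols; infer_instance
def pvWitness_empty_rows_and_cols : List (List String) := [[".", "#"], [".", "."]]

def Spec_empty_rows_and_cols (the_map : List (List String)) (out : List Int × List Int) : Prop := out = empty_rows_and_cols_alt the_map
instance (the_map : List (List String)) (out : List Int × List Int) : Decidable (Spec_empty_rows_and_cols the_map out) := by unfold Spec_empty_rows_and_cols; infer_instance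

-- ===== CLAIM (what is proved, stated in full; the proofs are below) =====
def Claim_equal_empty_rows_and_cols : Prop := ∀ (the_map : List (List String)), Dom_empty_rows_and_cols the_map → Pre_empty_rows_and_cols the_map → Spec_empty_rows_and_cols the_map (empty_rows_and_cols the_map)

-- ===== LEMMAS AND PROOFS =====

-- A row's test set(row)=={'.'} equals B's test (row nonempty and all cells '.')
lemma rowtest_eq (row : List String) :
    (PySem.Set.equal (PySem.Set.ofList row) (PySem.Set.ofList ["."]) = true) ↔
    (row ≠ [] ∧ row.all (· == ".") = true) := by
  rw [PySem.Set.equal_iff]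
  simp only [PySem.Set.mem_ofList, List.mem_singleton, List.all_eq_true, beq_iff_eq, ne_eq]
  constructor
  · intro h
    refine ⟨?_, fun x hx => (h x).1 hx⟩
    intro he; subst he; simpa using (h ".").2 rfl
  · rintro ⟨hne, hall⟩ x
    constructor
    · exact hall x
    · rintro rfl
      obtain ⟨y, hy⟩ := List.exists_mem_of_ne_nil row hne
      have := hall y hy; subst this; exact hy

-- B's paired fold splits into its two components
lemma alt_fold_split (l : List (Int × List String)) (w : Int) (st : List Int × PySem.Set Int) :
    l.foldl
      (fun (st : List Int × PySem.Set Int) p =>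
        ((if p.2 ≠ [] ∧ p.2.all (· == ".") then st.1 ++ [p.1] else st.1),
         (PySem.List.pyRange 0 w 1).foldl
          (fun s j => if PySem.List.pyGetD p.2 j "" ≠ "." then PySem.Set.add s j else s) st.2)) st
    = (l.foldl (fun acc p => if p.2 ≠ [] ∧ p.2.all (· == ".") then acc ++ [p.1] else acc) st.1,
       l.foldl (fun s p => (PySem.List.pyRange 0 w 1).foldl
          (fun s j => if PySem.List.pyGetD p.2 j "" ≠ "." then PySem.Set.add s j else s) s) st.2) := by
  induction l generalizing st with
  | nil => rfl
  | cons a l ih => simp only [List.foldl_cons, ih]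

-- membership in the inner "add if" fold
lemma mem_addfold (l : List Int) (c : Int → Prop) [DecidablePred c] (s : PySem.Set Int) (x : Int) :
    x ∈ l.foldl (fun s j => if c j then PySem.Set.add s j else s) s ↔
    x ∈ s ∨ (x ∈ l ∧ c x) := by
  induction l generalizing s with
  | nil => simp
  | cons a l ih =>
    simp only [List.foldl_cons, List.mem_cons]
    by_cases h : c a
    · rw [if_pos h, ih, PySem.Set.mem_add]
      constructor
      · rintro ((h1 | rfl) | h2)
        · exact Or.inl h1
        · exact Or.inr ⟨Or.inl rfl, h⟩
        · exact Or.inr ⟨Or.inr h2.1, h2.2⟩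
      · rintro (h1 | ⟨(rfl | h2), hc⟩)
        · exact Or.inl (Or.inl h1)
        · exact Or.inl (Or.inr rfl)
        · exact Or.inr ⟨h2, hc⟩
    · rw [if_neg h, ih]
      constructor
      · rintro (h1 | h2)
        · exact Or.inl h1
        · exact Or.inr ⟨Or.inr h2.1, h2.2⟩
      · rintro (h1 | ⟨(rfl | h2), hc⟩)
        · exact Or.inl h1
        · exact absurd hc h
        · exact Or.inr ⟨h2, hc⟩

-- membership in B's accumulated nonempty_cols set
lemma mem_nefold (l : List (Int × List String)) (w : Int) (s : PySem.Set Int) (x : Int) :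
    x ∈ l.foldl (fun s p => (PySem.List.pyRange 0 w 1).foldl
        (fun s j => if PySem.List.pyGetD p.2 j "" ≠ "." then PySem.Set.add s j else s) s) s ↔
    x ∈ s ∨ ∃ p ∈ l, x ∈ PySem.List.pyRange 0 w 1 ∧ PySem.List.pyGetD p.2 x "" ≠ "." := by
  induction l generalizing s with
  | nil => simp
  | cons a l ih =>
    simp only [List.foldl_cons, ih, mem_addfold, List.mem_cons]
    constructor
    · rintro ((h1 | h2) | ⟨p, hp, hx⟩)
      · exact Or.inl h1
      · exact Or.inr ⟨a, Or.inl rfl, h2⟩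
      · exact Or.inr ⟨p, Or.inr hp, hx⟩
    · rintro (h1 | ⟨p, (rfl | hp), hx⟩)
      · exact Or.inl (Or.inl h1)
      · exact Or.inl (Or.inr hx)
      · exact Or.inr ⟨p, hp, hx⟩

-- A's column test equals B's, pointwise, for nonempty maps
lemma coltest_eq (the_map : List (List String)) (h : the_map ≠ []) (j : Int) :
    (PySem.Set.equal
        (PySem.Set.ofList ((PySem.List.pyRange 0 (the_map.length : Int) 1).map
          (fun i => PySem.List.pyGetD (PySem.List.pyGetD the_map i []) j "")))
        (PySem.Set.ofList ["."]) = true) ↔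
    (∀ row ∈ the_map, PySem.List.pyGetD row j "" = ".") := by
  have hcol : (PySem.List.pyRange 0 (the_map.length : Int) 1).map
      (fun i => PySem.List.pyGetD (PySem.List.pyGetD the_map i []) j "")
      = the_map.map (fun row => PySem.List.pyGetD row j "") := by
    have h2 := PySem.List.map_pyGetD_pyRange_zero' (xs := the_map) (d := ([] : List String))
    calc (PySem.List.pyRange 0 (the_map.length : Int) 1).map
          (fun i => PySem.List.pyGetD (PySem.List.pyGetD the_map i []) j "")
        = ((PySem.List.pyRange 0 (the_map.length : Int) 1).map
            (fun i => PySem.List.pyGetD the_map i [])).map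
            (fun row => PySem.List.pyGetD row j "") := by rw [List.map_map]; rfl
      _ = the_map.map (fun row => PySem.List.pyGetD row j "") := by rw [h2]
  rw [hcol, rowtest_eq]
  simp only [ne_eq, List.map_eq_nil_iff, List.all_map, List.all_eq_true, Function.comp,
    beq_iff_eq]
  exact ⟨fun hx => hx.2, fun hx => ⟨h, hx⟩⟩

-- ===== VERDICT (by name: the statement is the Claim_ definition above) =====
theorem empty_rows_and_cols_spec : Claim_equal_empty_rows_and_cols := by
  intro the_map _ hpre
  obtain ⟨hne, -⟩ := hpre
  unfold Spec_empty_rows_and_cols empty_rows_and_cols empty_rows_and_cols_alt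
  dsimp only
  rw [alt_fold_split]
  refine Prod.ext ?_ ?_
  · -- empty_rows: same fold shape, pointwise-equal condition
    simp only
    congr 1
    funext acc p
    by_cases hc : PySem.Set.equal (PySem.Set.ofList p.2) (PySem.Set.ofList ["."]) = true
    · rw [if_pos hc, if_pos ((rowtest_eq p.2).1 hc)]
    · rw [if_neg hc, if_neg (fun hb => hc ((rowtest_eq p.2).2 hb))]
  · -- empty_cols: both are filters of range(width) by equivalent tests
    simp only
    rw [PySem.List.foldl_append_ite_eq_filter]
    simp only [List.nil_append]
    refine List.filter_congr ?_
    intro j hj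
    have hmem := mem_nefold (PySem.List.enumerate the_map)
      ((PySem.List.pyGetD the_map 0 []).length : Int) (PySem.Set.empty) j
    have hforall : (¬ j ∈ (PySem.List.enumerate the_map).foldl (fun s p =>
          (PySem.List.pyRange 0 ((PySem.List.pyGetD the_map 0 []).length : Int) 1).foldl
            (fun s j => if PySem.List.pyGetD p.2 j "" ≠ "." then PySem.Set.add s j else s) s)
          PySem.Set.empty)
        ↔ ∀ row ∈ the_map, PySem.List.pyGetD row j "" = "." := by
      rw [hmem]
      constructor
      · intro hno row hrow
        by_contra hx
        obtain ⟨k, hk, rfl⟩ : ∃ (k : Nat) (hk : k < the_map.length), row = the_map[k] := by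
          obtain ⟨k, hk, he⟩ := List.getElem_of_mem hrow
          exact ⟨k, hk, he.symm⟩
        exact hno (Or.inr ⟨((k : Int), the_map[k]), by
          rw [PySem.List.mem_enumerate_iff]; exact ⟨k, hk, by simp⟩, hj, hx⟩)
      · rintro hall (he | ⟨p, hp, -, hx⟩)
        · simp [PySem.Set.empty] at he
        · obtain ⟨k, hk, rfl⟩ := (PySem.List.mem_enumerate_iff _ _ _).1 hp
          exact hx (hall the_map[k] (List.getElem_mem hk))
    rcases hb : PySem.Set.contains
        ((PySem.List.enumerate the_map).foldl (fun s p =>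
          (PySem.List.pyRange 0 ((PySem.List.pyGetD the_map 0 []).length : Int) 1).foldl
            (fun s j => if PySem.List.pyGetD p.2 j "" ≠ "." then PySem.Set.add s j else s) s)
          PySem.Set.empty) j with _ | _
    · rw [hb]
      simp only [Bool.not_false]
      refine decide_eq_true ((coltest_eq the_map hne j).2 (hforall.1 ?_))
      intro h
      rw [(PySem.Set.contains_iff _ _).2 h] at hb
      cases hb
    · rw [hb]
      simp only [Bool.not_true]
      exact decide_eq_false (fun heq =>
        hforall.2 ((coltest_eq the_map hne j).1 heq) ((PySem.Set.contains_iff _ _).1 hb))
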